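-- pv_equiv track=rewrite | github.com/posl/comment_recommendation | script/mod_gen/3_time/zh/248_B/1.py | solve
-- ===== SOURCE A (Python) =====
-- def solve(a,b,k):
--     if a >= b:
--         return 0
--     if k == 1:
--         return b - a
--     ans = 0
--     while a < b:
--         a *= k
--         ans += 1
--     return ans
-- ===== SOURCE B (Python) =====
-- def solve(a, b, k):
--     if a >= b:
--         return 0
--     if k == 1:
--         return b - a
--     # exponential search for an upper bound, then binary search for the
--     # smallest n >= 1 with a * k**n >= b
--     hi = 1
--     while a * k**hi < b:
--         hi *= 2
--     lo = hi // 2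
--     while lo + 1 < hi:
--         mid = (lo + hi) // 2
--         if a * k**mid >= b:
--             hi = mid
--         else:
--             lo = mid
--     return hi
-- ===== Notes on version B (the rewrite author's own statement) =====
-- stated objective: alternative
-- what changed: Replaced the one-by-one multiply-and-count loop with exponential search for an upper bound followed by binary search for the smallest n>=1 with a*k**n >= b, so only O(log(answer)) probes are made instead of O(answer) multiplications.
-- outside the precondition, e.g. on solve(-1, 5, -2): A returns 3, B does not finish within the time limit; on solve(1, 10, -2): A returns 4, B returns 4
import Mathlib
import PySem

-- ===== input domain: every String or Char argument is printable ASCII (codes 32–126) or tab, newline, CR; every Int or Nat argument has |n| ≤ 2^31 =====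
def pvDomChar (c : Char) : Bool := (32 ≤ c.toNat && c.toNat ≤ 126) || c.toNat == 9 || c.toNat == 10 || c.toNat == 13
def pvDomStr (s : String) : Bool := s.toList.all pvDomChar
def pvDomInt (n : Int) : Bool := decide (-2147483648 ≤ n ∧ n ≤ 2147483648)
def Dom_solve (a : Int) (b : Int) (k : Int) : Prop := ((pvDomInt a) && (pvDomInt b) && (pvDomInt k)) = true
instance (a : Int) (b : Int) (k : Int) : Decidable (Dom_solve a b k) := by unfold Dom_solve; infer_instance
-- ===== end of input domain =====

-- B replaces A's multiply-one-at-a-time counting loop by exponential search plus binary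
-- search over the exponent (objective: alternative algorithm; fewer probes, not measured faster).

-- ===== PORT A =====
-- A's while loop, with fuel: within Dom ∧ Pre the loop runs at most 32 times (a ≥ 1,
-- k ≥ 2, b ≤ 2^31), so fuel 64 never runs out there; the fuel only makes it total.
def solveLoop (fuel : Nat) (a b k ans : Int) : Int :=
  match fuel with
  | 0 => ans
  | fuel + 1 => if a < b then solveLoop fuel (a * k) b k (ans + 1) else ans

def solve (a : Int) (b : Int) (k : Int) : Int :=
  if a ≥ b then 0
  else if k = 1 then b - a
  else solveLoop 64 a b k 0

-- ===== PORT B =====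
-- B's exponents hi/lo/mid are nonnegative Python ints throughout (hi starts at 1 and
-- doubles; lo = hi//2; mid = (lo+hi)//2), so they are ported as Nat; Nat '/' agrees with
-- Python '//' on nonnegatives. Fuel 64 only makes the loops total: within Dom ∧ Pre the
-- up-phase stops with hi ≤ 64 and the bisection halves a gap ≤ 32.
def altUp (fuel : Nat) (a b k : Int) (hi : Nat) : Nat :=
  match fuel with
  | 0 => hi
  | fuel + 1 => if a * k ^ hi < b then altUp fuel a b k (hi * 2) else hi

def altBis (fuel : Nat) (a b k : Int) (lo hi : Nat) : Nat :=
  match fuel with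
  | 0 => hi
  | fuel + 1 =>
    if lo + 1 < hi then
      let mid := (lo + hi) / 2
      if a * k ^ mid ≥ b then altBis fuel a b k lo mid else altBis fuel a b k mid hi
    else hi

def solve_alt (a : Int) (b : Int) (k : Int) : Int :=
  if a ≥ b then 0
  else if k = 1 then b - a
  else
    let hi := altUp 64 a b k 1
    (altBis 64 a b k (hi / 2) hi : Int)

-- ===== PRECONDITION & SPEC =====
-- Pre_ restricts the general case (a < b, k ≠ 1) to the natural domain k ≥ 2 and a ≥ 1:
-- outside it A's loop diverges for a ≤ 0 or k = 0 (e.g. a=0,b=1,k=2), and for negative k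
-- it terminates only by sign oscillation (B's up-phase can diverge there, e.g. (-1,5,-2)).
def Pre_solve (a : Int) (b : Int) (k : Int) : Prop :=
  b ≤ a ∨ k = 1 ∨ (2 ≤ k ∧ 1 ≤ a)
instance (a : Int) (b : Int) (k : Int) : Decidable (Pre_solve a b k) := by
  unfold Pre_solve; infer_instance

def pvWitness_solve : Int × Int × Int := (3, 100, 2)

def Spec_solve (a : Int) (b : Int) (k : Int) (out : Int) : Prop := out = solve_alt a b k
instance (a : Int) (b : Int) (k : Int) (out : Int) : Decidable (Spec_solve a b k out) := by
  unfold Spec_solve; infer_instance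

-- ===== CLAIM (what is proved, stated in full; the proofs are below) =====
def Claim_equal_solve : Prop :=
  ∀ (a : Int) (b : Int) (k : Int), Dom_solve a b k → Pre_solve a b k →
    Spec_solve a b k (solve a b k)

-- ===== LEMMAS AND PROOFS =====

-- monotonicity of n ↦ a * k^n for a ≥ 1, k ≥ 2
theorem pv_mono {a k : Int} (ha : 1 ≤ a) (hk : 2 ≤ k) {m n : Nat} (h : m ≤ n) :
    a * k ^ m ≤ a * k ^ n :=
  mul_le_mul_of_nonneg_left (pow_le_pow_right₀ (by omega) h) (by omega)

-- growth: 2^n ≤ a * k^n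
theorem pv_grow {a k : Int} (ha : 1 ≤ a) (hk : 2 ≤ k) (n : Nat) :
    (2:Int) ^ n ≤ a * k ^ n := by
  calc (2:Int) ^ n ≤ k ^ n := pow_le_pow_left₀ (by omega) hk n
    _ = 1 * k ^ n := (one_mul _).symm
    _ ≤ a * k ^ n := mul_le_mul_of_nonneg_right ha (pow_nonneg (by omega) n)

-- A's loop returns ans + j where j is the least exponent with a*k^j ≥ b,
-- provided the fuel reaches such an exponent.
theorem pv_loopA (fuel : Nat) :
    ∀ (a b k ans : Int), b ≤ a * k ^ fuel →
      ∃ j : Nat, j ≤ fuel ∧ solveLoop fuel a b k ans = ans + (j : Int) ∧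
        b ≤ a * k ^ j ∧ ∀ m : Nat, m < j → a * k ^ m < b := by
  induction fuel with
  | zero =>
    intro a b k ans h
    refine ⟨0, le_refl _, ?_, by simpa using h, by omega⟩
    simp [solveLoop]
  | succ fuel ih =>
    intro a b k ans h
    by_cases hab : a < b
    · have h' : b ≤ (a * k) * k ^ fuel := by
        have : a * k ^ (fuel + 1) = (a * k) * k ^ fuel := by ring
        omega
      obtain ⟨j, hj, heq, hge, hmin⟩ := ih (a * k) b k (ans + 1) h'
      refine ⟨j + 1, by omega, ?_, ?_, ?_⟩
      · simp [solveLoop, hab]; omega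
      · have : a * k ^ (j + 1) = (a * k) * k ^ j := by ring
        omega
      · intro m hm
        match m with
        | 0 => simpa using hab
        | m + 1 =>
          have : (a * k) * k ^ m < b := hmin m (by omega)
          have e : a * k ^ (m + 1) = (a * k) * k ^ m := by ring
          omega
    · refine ⟨0, by omega, ?_, ?_, by omega⟩
      · simp [solveLoop, hab]
      · simpa using (by omega : b ≤ a)

-- B's up-phase: from a valid start it returns r with the invariant, provided every
-- exponent ≥ 32 already satisfies the target and the fuel lets hi reach 64.
theorem pv_up (fuel : Nat) :
    ∀ (a b k : Int) (hi : Nat), 1 ≤ hi → a * k ^ (hi / 2) < b →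
      (∀ m : Nat, 32 ≤ m → b ≤ a * k ^ m) → 64 ≤ hi * 2 ^ fuel →
      (1 ≤ altUp fuel a b k hi ∧
        a * k ^ (altUp fuel a b k hi / 2) < b ∧ b ≤ a * k ^ (altUp fuel a b k hi)) := by
  induction fuel with
  | zero =>
    intro a b k hi h1 hinv hbig hterm
    simp only [pow_zero, mul_one] at hterm
    simp only [altUp]
    exact ⟨h1, hinv, hbig hi (by omega)⟩
  | succ fuel ih =>
    intro a b k hi h1 hinv hbig hterm
    simp only [altUp]
    by_cases hc : a * k ^ hi < b
    · simp only [hc, if_true]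
      have h2 : (hi * 2) / 2 = hi := by omega
      have h3 : hi * 2 ^ (fuel + 1) = (hi * 2) * 2 ^ fuel := by ring
      exact ih a b k (hi * 2) (by omega) (by rw [h2]; exact hc) hbig (by omega)
    · simp only [hc, if_false]
      exact ⟨h1, hinv, by omega⟩

-- B's bisection: maintains a*k^lo < b ≤ a*k^hi, lo < hi; returns r with
-- b ≤ a*k^r and a*k^(r-1) < b, given enough fuel for the gap.
theorem pv_bis (fuel : Nat) :
    ∀ (a b k : Int) (lo hi : Nat), lo < hi → hi - lo ≤ 2 ^ fuel →
      a * k ^ lo < b → b ≤ a * k ^ hi →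
      (1 ≤ altBis fuel a b k lo hi ∧ b ≤ a * k ^ (altBis fuel a b k lo hi) ∧
        a * k ^ (altBis fuel a b k lo hi - 1) < b) := by
  induction fuel with
  | zero =>
    intro a b k lo hi hlt hgap hlo hhi
    have : hi = lo + 1 := by simpa using (by omega : hi = lo + 1)
    subst this
    simp only [altBis]
    exact ⟨by omega, hhi, by simpa using hlo⟩
  | succ fuel ih =>
    intro a b k lo hi hlt hgap hlo hhi
    simp only [altBis]
    by_cases hc : lo + 1 < hi
    · simp only [hc, if_true]
      have h2f : (2:Nat) ^ (fuel + 1) = 2 * 2 ^ fuel := by ring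
      by_cases hmid : a * k ^ ((lo + hi) / 2) ≥ b
      · simp only [hmid, if_true]
        exact ih a b k lo ((lo + hi) / 2) (by omega) (by omega) hlo hmid
      · simp only [hmid, if_false]
        exact ih a b k ((lo + hi) / 2) hi (by omega) (by omega) (by omega) hhi
    · simp only [hc, if_false]
      have : hi = lo + 1 := by omega
      subst this
      exact ⟨by omega, hhi, by simpa using hlo⟩

-- ===== VERDICT (by name: the statement is the Claim_ definition above) =====
theorem solve_spec : Claim_equal_solve := by
  intro a b k hdom hpre
  unfold Spec_solve solve solve_alt
  by_cases hab : a ≥ b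
  · simp [hab]
  · simp only [hab, if_false]
    by_cases hk1 : k = 1
    · simp [hk1]
    · simp only [hk1, if_false]
      rcases hpre with h | h | ⟨hk, ha⟩
      · omega
      · exact absurd h hk1
      -- general case: 2 ≤ k, 1 ≤ a, a < b
      have hb31 : b ≤ 2147483648 := by
        unfold Dom_solve pvDomInt at hdom
        simp only [Bool.and_eq_true, decide_eq_true_eq] at hdom
        omega
      have hb64 : b ≤ a * k ^ (64:Nat) := by
        have h1 : (2:Int) ^ (64:Nat) ≤ a * k ^ (64:Nat) := pv_grow ha hk 64
        have h2 : (2147483648 : Int) ≤ (2:Int) ^ (64:Nat) := by norm_num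
        omega
      -- A's side: least exponent j
      obtain ⟨j, hjle, heq, hge, hmin⟩ := pv_loopA 64 a b k 0 hb64
      rw [heq]
      -- B's side
      have hbig : ∀ m : Nat, 32 ≤ m → b ≤ a * k ^ m := by
        intro m hm
        have h1 : (2:Int) ^ m ≤ a * k ^ m := pv_grow ha hk m
        have h2 : (2:Int) ^ (32:Nat) ≤ (2:Int) ^ m := pow_le_pow_right₀ (by norm_num) hm
        have h3 : (2147483648 : Int) < (2:Int) ^ (32:Nat) := by norm_num
        omega
      have hup := pv_up 64 a b k 1 (le_refl 1) (by simpa using (by omega : a < b)) hbig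
        (by norm_num)
      set H := altUp 64 a b k 1 with hH
      obtain ⟨hH1, hHinv, hHge⟩ := hup
      -- H/2 ≤ 31 since 2^(H/2) ≤ a*k^(H/2) < b ≤ 2^31 < 2^32
      have hHsmall : H / 2 ≤ 31 := by
        by_contra hcon
        have hm : (32:Nat) ≤ H / 2 := by omega
        have := hbig (H / 2) hm
        omega
      have hgap : H - H / 2 ≤ 2 ^ (64:Nat) := by
        have h1 : H ≤ 63 := by omega
        have h2 : (63:Nat) ≤ 2 ^ (64:Nat) := by norm_num
        omega
      have hbis := pv_bis 64 a b k (H / 2) H (by omega) hgap hHinv hHge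
      set R := altBis 64 a b k (H / 2) H with hR
      obtain ⟨hR1, hRge, hRlt⟩ := hbis
      -- j = R by minimality + monotonicity
      have hjR : j = R := by
        have hge2 : R ≤ j := by
          by_contra hcon
          have hle : j ≤ R - 1 := by omega
          have : a * k ^ j ≤ a * k ^ (R - 1) := pv_mono ha hk hle
          omega
        have hle2 : j ≤ R := by
          by_contra hcon
          have : a * k ^ R < b := hmin R (by omega)
          omega
        omega
      simp [hjR]
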